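-- pv_equiv track=rewrite | github.com/AniketWagh2001/AI-AND-CD | AI Assignments/AI Assignments/ai/Ass5/crossword.py | get_across_slots
-- ===== SOURCE A (Python) =====
-- def check_right(i, j, grid) -> tuple[int, int, int]:
--     counter = 0
--     while (counter + j) < len(grid[i]):
--         if grid[i][j + counter] == ' ':
--             counter += 1
--         else:
--             break
--     if counter < 2:
--         return None
--     else:
--         return (i, j, counter)
--
-- def get_across_slots(grid: list[str]):
--     accross_slots = []
--     i = 0
--     while i < len(grid):
--         j = 0
--         while j < len(grid[i]):
--             if grid[i][j] == ' ':
--                 if slot := check_right(i, j, grid):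
--                     accross_slots.append(slot)
--                     j += slot[2]
--             j += 1
--         i += 1
--     return accross_slots
-- ===== SOURCE B (Python) =====
-- def get_across_slots(grid: list[str]):
--     slots = []
--     for i, row in enumerate(grid):
--         run = 0
--         for j, ch in enumerate(row):
--             if ch == ' ':
--                 run += 1
--             else:
--                 if run >= 2:
--                     slots.append((i, j - run, run))
--                 run = 0
--         if run >= 2:
--             slots.append((i, len(row) - run, run))
--     return slots
-- ===== Notes on version B (the rewrite author's own statement) =====
-- stated objective: simpler
-- what changed: Replaced the probe-and-skip nested while loops (a helper re-scanning ahead from each space cell, then jumping the index) with a single pass per row that maintains a run-length accumulator and flushes maximal space runs of length >= 2.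
import Mathlib
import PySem

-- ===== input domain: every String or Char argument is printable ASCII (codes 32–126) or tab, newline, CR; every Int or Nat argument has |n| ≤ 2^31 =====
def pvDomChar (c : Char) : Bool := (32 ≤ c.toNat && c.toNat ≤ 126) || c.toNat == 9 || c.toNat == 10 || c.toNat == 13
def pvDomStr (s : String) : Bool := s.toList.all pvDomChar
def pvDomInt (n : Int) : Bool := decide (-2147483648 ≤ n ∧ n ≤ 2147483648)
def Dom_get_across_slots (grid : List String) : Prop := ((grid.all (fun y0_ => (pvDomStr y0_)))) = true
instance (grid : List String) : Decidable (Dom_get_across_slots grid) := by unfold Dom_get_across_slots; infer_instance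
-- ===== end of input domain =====

-- B replaces A's probe-and-skip nested while loops by a single run-accumulator pass per row; objective: simpler.

-- ===== PORT A =====
-- the 'while (counter + j) < len(grid[i])' loop of check_right
def pvCrLoop (cs : List Char) (j counter : Nat) : Nat :=
  if h : counter + j < cs.length then
    if cs[counter + j] = ' ' then pvCrLoop cs j (counter + 1) else counter
  else counter
termination_by cs.length - (counter + j)

def pvCheckRight (i j : Nat) (cs : List Char) : Option (Int × Int × Int) :=
  let counter := pvCrLoop cs j 0
  if counter < 2 then none else some ((i : Int), (j : Int), (counter : Int))

-- the inner 'while j < len(grid[i])' loop (the appended list is the emitted output)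
def pvAInner (i : Nat) (cs : List Char) (j : Nat) : List (Int × Int × Int) :=
  if h : j < cs.length then
    if cs[j] = ' ' then
      match pvCheckRight i j cs with
      | some slot => slot :: pvAInner i cs (j + slot.2.2.toNat + 1)
      | none => pvAInner i cs (j + 1)
    else pvAInner i cs (j + 1)
  else []
termination_by cs.length - j
decreasing_by all_goals omega

-- the outer 'while i < len(grid)' loop
def pvARows (grid : List String) (i : Nat) : List (Int × Int × Int) :=
  if h : i < grid.length then pvAInner i grid[i].toList 0 ++ pvARows grid (i + 1) else []
termination_by grid.length - i

def get_across_slots (grid : List String) : List (Int × Int × Int) :=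
  pvARows grid 0

-- ===== PORT B =====
-- one pass over the row's characters, carrying the current index j and the current run length
def pvBRow (i : Int) (j run : Nat) (cs : List Char) : List (Int × Int × Int) :=
  match cs with
  | [] => if 2 ≤ run then [(i, (j : Int) - run, (run : Int))] else []
  | c :: rest =>
    if c = ' ' then pvBRow i (j + 1) (run + 1) rest
    else (if 2 ≤ run then [(i, (j : Int) - run, (run : Int))] else []) ++ pvBRow i (j + 1) 0 rest

def get_across_slots_alt (grid : List String) : List (Int × Int × Int) :=
  (PySem.List.enumerate grid 0).flatMap (fun p => pvBRow p.1 0 0 p.2.toList)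

-- ===== PRECONDITION & SPEC =====
def Spec_get_across_slots (grid : List String) (out : List (Int × Int × Int)) : Prop := out = get_across_slots_alt grid
instance (grid : List String) (out : List (Int × Int × Int)) : Decidable (Spec_get_across_slots grid out) := by unfold Spec_get_across_slots; infer_instance

-- ===== CLAIM (what is proved, stated in full; the proofs are below) =====
def Claim_equal_get_across_slots : Prop := ∀ (grid : List String), Dom_get_across_slots grid → Spec_get_across_slots grid (get_across_slots grid)

-- ===== LEMMAS AND PROOFS =====

-- characterisation of check_right's counter loop: it counts ≥ k, everything counted is a space,
-- and it stops at the end of the row or at a non-space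
theorem pvCrLoop_spec (cs : List Char) (j : Nat) :
    ∀ n k, cs.length - (k + j) ≤ n → k ≤ pvCrLoop cs j k ∧
      (∀ m, k ≤ m → m < pvCrLoop cs j k → ∃ h : j + m < cs.length, cs[j + m] = ' ') ∧
      (cs.length ≤ pvCrLoop cs j k + j ∨
        ∃ h : pvCrLoop cs j k + j < cs.length, cs[pvCrLoop cs j k + j] ≠ ' ') := by
  intro n
  induction n with
  | zero =>
    intro k hk
    rw [pvCrLoop, dif_neg (by omega)]
    exact ⟨le_refl _, fun m h1 h2 => absurd h2 (by omega), Or.inl (by omega)⟩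
  | succ n ih =>
    intro k hk
    by_cases h : k + j < cs.length
    · by_cases hsp : cs[k + j] = ' '
      · rw [pvCrLoop, dif_pos h, if_pos hsp]
        obtain ⟨ih1, ih2, ih3⟩ := ih (k + 1) (by omega)
        refine ⟨by omega, ?_, ih3⟩
        intro m hkm hm
        rcases Nat.eq_or_lt_of_le hkm with rfl | hlt
        · exact ⟨by omega, by convert hsp using 2; omega⟩
        · exact ih2 m hlt hm
      · rw [pvCrLoop, dif_pos h, if_neg hsp]
        exact ⟨le_refl _, fun m h1 h2 => absurd h2 (by omega), Or.inr ⟨h, hsp⟩⟩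
    · rw [pvCrLoop, dif_neg h]
      exact ⟨le_refl _, fun m h1 h2 => absurd h2 (by omega), Or.inl (by omega)⟩

-- B's scanner walks through a block of spaces by just increasing the run counter
theorem pvBRow_spaces (i : Int) (rest : List Char) :
    ∀ (s : List Char), (∀ c ∈ s, c = ' ') → ∀ j run,
      pvBRow i j run (s ++ rest) = pvBRow i (j + s.length) (run + s.length) rest := by
  intro s
  induction s with
  | nil => intro _ j run; simp
  | cons c t ih =>
    intro hs j run
    have hc : c = ' ' := hs c (by simp)
    simp only [List.cons_append, pvBRow, if_pos hc]
    rw [ih (fun x hx => hs x (by simp [hx])) (j + 1) (run + 1)]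
    congr 1 <;> simp <;> omega

-- per-row equivalence: A's probe-and-skip scan from position j equals B's run scan on the row's tail
theorem pvAInner_eq (i : Nat) (cs : List Char) :
    ∀ n j, cs.length - j ≤ n → pvAInner i cs j = pvBRow (i : Int) j 0 (cs.drop j) := by
  intro n
  induction n with
  | zero =>
    intro j hj
    rw [pvAInner, dif_neg (by omega), List.drop_eq_nil_of_le (by omega)]
    simp [pvBRow]
  | succ n ih =>
    intro j hj
    by_cases h : j < cs.length
    · have hdrop : cs.drop j = cs[j] :: cs.drop (j + 1) := List.drop_eq_getElem_cons h
      by_cases hsp : cs[j] = ' '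
      · -- space at j: analyse the counter
        set c := pvCrLoop cs j 0 with hc
        obtain ⟨_, hsp2, hend⟩ := pvCrLoop_spec cs j cs.length 0 (by omega)
        have hc1 : 1 ≤ c := by
          have : pvCrLoop cs j 0 = pvCrLoop cs j 1 := by
            rw [pvCrLoop]; rw [dif_pos (by omega)]
            rw [if_pos (by simpa using hsp)]
          have h1 := (pvCrLoop_spec cs j cs.length 1 (by omega)).1
          omega
        have hsps : ∀ m, m < c → ∃ hh : j + m < cs.length, cs[j + m] = ' ' :=
          fun m hm => hsp2 m (by omega) hm
        have hcle : j + c ≤ cs.length := by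
          obtain ⟨hh, _⟩ := hsps (c - 1) (by omega)
          omega
        -- split the drop into the space run and the tail
        have hsplit : cs.drop j = (cs.drop j).take c ++ cs.drop (j + c) := by
          rw [← List.drop_drop]; rw [List.take_append_drop]
        have htlen : ((cs.drop j).take c).length = c := by
          simp [List.length_take, List.length_drop]; omega
        have hall : ∀ x ∈ (cs.drop j).take c, x = ' ' := by
          intro x hx
          obtain ⟨m, hm, rfl⟩ := List.getElem_of_mem hx
          rw [List.getElem_take, List.getElem_drop]
          obtain ⟨hh, hs⟩ := hsps m (by omega)
          exact hs
        have hB : pvBRow (i : Int) j 0 (cs.drop j)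
            = pvBRow (i : Int) (j + c) c (cs.drop (j + c)) := by
          rw [hsplit, pvBRow_spaces (i : Int) _ _ hall j 0, htlen, Nat.zero_add]
        have hendcase : cs.length ≤ c + j ∨ ∃ hh : c + j < cs.length, cs[c + j] ≠ ' ' := hend
        rw [pvAInner, dif_pos h, if_pos hsp]
        by_cases h2 : c < 2
        · -- run of length 1: A emits nothing
          have hcr : pvCheckRight i j cs = none := by
            simp [pvCheckRight, ← hc, h2]
          rw [hcr]
          have hc1' : c = 1 := by omega
          rcases hendcase with hle | ⟨hlt, hne⟩
          · have : cs.length = j + 1 := by omega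
            rw [pvAInner, dif_neg (by omega), hB]
            rw [List.drop_eq_nil_of_le (by omega)]
            simp [pvBRow, hc1']
          · have hj1 : j + 1 < cs.length := by omega
            have hne' : cs[j + 1] ≠ ' ' := by convert hne using 2; omega
            rw [pvAInner, dif_pos hj1, if_neg hne']
            rw [hB, hc1', List.drop_eq_getElem_cons hj1, pvBRow, if_neg hne']
            simpa using ih (j + 1 + 1) (by omega)
        · -- run of length ≥ 2: A emits (i, j, c) and jumps past the run
          have hcr : pvCheckRight i j cs
              = some ((i : Int), (j : Int), (c : Int)) := by
            simp [pvCheckRight, ← hc, h2]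
          rw [hcr]
          simp only [Int.toNat_natCast]
          rcases hendcase with hle | ⟨hlt, hne⟩
          · have hlen : cs.length = j + c := by omega
            rw [pvAInner, dif_neg (by omega), hB]
            rw [List.drop_eq_nil_of_le (by omega)]
            simp only [pvBRow, if_pos (by omega : 2 ≤ c)]
            simp only [List.cons.injEq, Prod.mk.injEq]
            refine ⟨⟨trivial, ?_, trivial⟩, trivial⟩
            push_cast; ring
          · have hjc : j + c < cs.length := by omega
            have hne' : cs[j + c] ≠ ' ' := by convert hne using 2; omega
            rw [hB, List.drop_eq_getElem_cons hjc, pvBRow, if_neg hne']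
            rw [if_pos (by omega : 2 ≤ c)]
            rw [ih (j + c + 1) (by omega)]
            simp only [List.cons_append, List.nil_append, List.cons.injEq, Prod.mk.injEq]
            refine ⟨⟨trivial, ?_, trivial⟩, trivial⟩
            push_cast; ring
      · rw [pvAInner, dif_pos h, if_neg hsp]
        rw [hdrop, pvBRow, if_neg hsp]
        simpa using ih (j + 1) (by omega)
    · rw [pvAInner, dif_neg h, List.drop_eq_nil_of_le (by omega)]
      simp [pvBRow]

-- A's outer row loop from row i equals B's flatMap over the enumerated remaining rows
theorem pvARows_eq (grid : List String) :
    ∀ n i, grid.length - i ≤ n → pvARows grid i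
      = (PySem.List.enumerate (grid.drop i) (i : Int)).flatMap
        (fun p => pvBRow p.1 0 0 p.2.toList) := by
  intro n
  induction n with
  | zero =>
    intro i hi
    rw [pvARows, dif_neg (by omega), List.drop_eq_nil_of_le (by omega)]
    simp [PySem.List.enumerate]
  | succ n ih =>
    intro i hi
    by_cases h : i < grid.length
    · rw [pvARows, dif_pos h, List.drop_eq_getElem_cons h,
        PySem.List.enumerate_cons, List.flatMap_cons]
      congr 1
      · rw [pvAInner_eq i grid[i].toList grid[i].toList.length 0 (by omega)]
        simp
      · rw [ih (i + 1) (by omega)]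
        norm_num
    · rw [pvARows, dif_neg h, List.drop_eq_nil_of_le (by omega)]
      simp [PySem.List.enumerate]

-- ===== VERDICT (by name: the statement is the Claim_ definition above) =====
theorem get_across_slots_spec : Claim_equal_get_across_slots := by
  intro grid _
  unfold Spec_get_across_slots get_across_slots get_across_slots_alt
  simpa using pvARows_eq grid grid.length 0 (by omega)
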